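-- pv_equiv track=rewrite | github.com/calgoneq/Velox | velox/analysis/indicators/fvg.py | calculate_sentiment_fvg
-- ===== SOURCE A (Python) =====
-- def calculate_sentiment_fvg(fvg: list[str]) -> int:
--     sentiment_score = 0
--
--     for i in fvg:
--         if i == "Bullish Gap":
--             sentiment_score += 1
--         elif i == "Bearish Gap":
--             sentiment_score -= 1
--         else:
--             sentiment_score += 0
--
--     return sentiment_score
-- ===== SOURCE B (Python) =====
-- def calculate_sentiment_fvg(fvg: list[str]) -> int:
--     return fvg.count("Bullish Gap") - fvg.count("Bearish Gap")
-- ===== Notes on version B (the rewrite author's own statement) =====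
-- stated objective: simpler
-- what changed: Replaces the per-element branch-and-accumulate loop with two staged list.count passes (count bullish labels, count bearish labels, subtract); no accumulator or branching remains.
import Mathlib
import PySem

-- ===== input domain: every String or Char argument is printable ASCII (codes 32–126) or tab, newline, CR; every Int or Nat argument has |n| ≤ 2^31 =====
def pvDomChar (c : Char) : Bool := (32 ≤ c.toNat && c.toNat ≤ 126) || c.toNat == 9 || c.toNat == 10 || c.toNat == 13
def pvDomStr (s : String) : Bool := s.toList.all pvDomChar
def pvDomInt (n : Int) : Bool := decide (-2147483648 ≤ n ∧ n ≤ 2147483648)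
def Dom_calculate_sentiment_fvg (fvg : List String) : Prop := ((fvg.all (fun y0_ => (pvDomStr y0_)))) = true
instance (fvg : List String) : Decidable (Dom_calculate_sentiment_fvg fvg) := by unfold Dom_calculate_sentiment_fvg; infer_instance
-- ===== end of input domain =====

-- B replaces A's branch-and-accumulate loop with two staged list.count passes and a subtraction (simpler).

-- ===== PORT A =====
def calculate_sentiment_fvg (fvg : List String) : Int :=
  fvg.foldl (fun sentiment_score i =>
    if i == "Bullish Gap" then sentiment_score + 1
    else if i == "Bearish Gap" then sentiment_score - 1
    else sentiment_score + 0) 0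

-- ===== PORT B =====
def calculate_sentiment_fvg_alt (fvg : List String) : Int :=
  (PySem.List.count fvg "Bullish Gap" : Int) - (PySem.List.count fvg "Bearish Gap" : Int)

-- ===== PRECONDITION & SPEC =====
def Spec_calculate_sentiment_fvg (fvg : List String) (out : Int) : Prop := out = calculate_sentiment_fvg_alt fvg
instance (fvg : List String) (out : Int) : Decidable (Spec_calculate_sentiment_fvg fvg out) := by unfold Spec_calculate_sentiment_fvg; infer_instance

-- ===== CLAIM (what is proved, stated in full; the proofs are below) =====
def Claim_equal_calculate_sentiment_fvg : Prop := ∀ (fvg : List String), Dom_calculate_sentiment_fvg fvg → Spec_calculate_sentiment_fvg fvg (calculate_sentiment_fvg fvg)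

-- ===== LEMMAS AND PROOFS =====

-- A's accumulate loop computes s + count("Bullish Gap") − count("Bearish Gap").
theorem pv_loop_counts (fvg : List String) (s : Int) :
    fvg.foldl (fun sentiment_score i =>
      if i == "Bullish Gap" then sentiment_score + 1
      else if i == "Bearish Gap" then sentiment_score - 1
      else sentiment_score + 0) s
    = s + (fvg.count "Bullish Gap" : Int) - (fvg.count "Bearish Gap" : Int) := by
  induction fvg generalizing s with
  | nil => simp
  | cons x xs ih =>
    simp only [List.foldl, ih, List.count_cons]
    by_cases hb : x = "Bullish Gap"
    · simp [hb]; ring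
    · by_cases hr : x = "Bearish Gap"
      · simp [hr]; ring
      · simp [hb, hr, Ne.symm hb]

-- ===== VERDICT (by name: the statement is the Claim_ definition above) =====
theorem calculate_sentiment_fvg_spec : Claim_equal_calculate_sentiment_fvg := by
  intro fvg _
  unfold Spec_calculate_sentiment_fvg calculate_sentiment_fvg calculate_sentiment_fvg_alt
  rw [pv_loop_counts, PySem.List.count_eq, PySem.List.count_eq]
  ring
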